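-- pv_equiv track=rewrite | github.com/Coder-Chandler/L_0 | Classic Questions/Fibonacci.py | printFib
-- ===== SOURCE A (Python) =====
-- def fib(x):
--     '''
--     assumes x an int >= 0
--     '''
--     assert type(x) == int and x >= 0,\
--     'Your variable is not an Positive integer!'
--     if x == 0 or x == 1:
--         return 1
--     else:
--         return fib(x-2) + fib(x-1)
--
-- def printFib(x):
--     '''
--     print Fibonacci series from 0~x
--     '''
--     assert type(x) == int and x >= 0,\
--     'Your variable is not an Positive integer!'
--     fib_l = []
--     for i in range(x):
--         i = fib(i)
--         fib_l.append(i)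
--     return fib_l
-- ===== SOURCE B (Python) =====
-- def printFib(x):
--     '''
--     print Fibonacci series from 0~x
--     '''
--     assert type(x) == int and x >= 0,\
--     'Your variable is not an Positive integer!'
--     fib_l = []
--     a, b = 1, 1
--     for _ in range(x):
--         fib_l.append(a)
--         a, b = b, a + b
--     return fib_l
-- ===== Notes on version B (the rewrite author's own statement) =====
-- stated objective: faster
-- what changed: Replaces per-element naive double recursion fib(i) with a single iterative pass carrying the pair of consecutive Fibonacci values, appending one per step.
import Mathlib
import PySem

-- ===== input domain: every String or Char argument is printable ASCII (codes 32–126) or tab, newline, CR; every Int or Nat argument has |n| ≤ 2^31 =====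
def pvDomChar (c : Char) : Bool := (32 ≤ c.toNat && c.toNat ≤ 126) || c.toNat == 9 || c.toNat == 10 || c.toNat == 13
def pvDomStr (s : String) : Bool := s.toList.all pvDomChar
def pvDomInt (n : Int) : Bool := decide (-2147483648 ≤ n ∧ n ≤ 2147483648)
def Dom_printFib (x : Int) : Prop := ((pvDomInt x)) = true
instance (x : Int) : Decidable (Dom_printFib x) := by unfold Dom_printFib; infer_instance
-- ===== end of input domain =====

-- B replaces A's exponential per-element recursion by one iterative pass carrying two consecutive Fibonacci values (objective: faster).

-- ===== PORT A =====
-- fib(x) of A, naive double recursion; A only calls it on the nonnegative ints of range(x),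
-- so the Nat recursion argument is exact there (the Int→Nat view is commented at the call site)
def fibA : Nat → Int
  | 0 => 1
  | 1 => 1
  | (n+2) => fibA n + fibA (n+1)

-- for i in range(x): fib_l.append(fib(i)); range elements are ≥ 0 under Pre_, so i.toNat = i exactly
def printFib (x : Int) : List Int :=
  (PySem.List.pyRange 0 x 1).foldl (fun acc i => acc ++ [fibA i.toNat]) []

-- ===== PORT B =====
-- the loop of Source B: each step appends a and shifts (a, b) ← (b, a+b); fuel = number of iterations
def fibLoop : Nat → Int → Int → List Int
  | 0, _, _ => []
  | (k+1), a, b => a :: fibLoop k b (a + b)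

def printFib_alt (x : Int) : List Int := fibLoop x.toNat 1 1

-- ===== PRECONDITION & SPEC =====
-- A asserts x >= 0 (AssertionError on negative x); Pre_ excludes exactly those inputs.
def Pre_printFib (x : Int) : Prop := 0 ≤ x
instance (x : Int) : Decidable (Pre_printFib x) := by unfold Pre_printFib; infer_instance
def pvWitness_printFib : Int := (6)

def Spec_printFib (x : Int) (out : List Int) : Prop := out = printFib_alt x
instance (x : Int) (out : List Int) : Decidable (Spec_printFib x out) := by unfold Spec_printFib; infer_instance

-- ===== CLAIM (what is proved, stated in full; the proofs are below) =====
def Claim_equal_printFib : Prop := ∀ (x : Int), Dom_printFib x → Pre_printFib x → Spec_printFib x (printFib x)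

-- ===== LEMMAS AND PROOFS =====

-- B's loop, started at consecutive Fibonacci values, lists fibA (n), fibA (n+1), …
theorem fibLoop_eq_map (k n : Nat) :
    fibLoop k (fibA n) (fibA (n+1)) = (List.range k).map (fun j => fibA (n + j)) := by
  induction k generalizing n with
  | zero => simp [fibLoop]
  | succ k ih =>
    have h2 : fibA n + fibA (n+1) = fibA (n+2) := rfl
    rw [List.range_succ_eq_map]
    simp only [fibLoop, h2, List.map_cons, List.map_map, Nat.add_zero]
    refine congrArg₂ _ rfl ?_
    rw [ih (n+1)]
    apply List.map_congr_left
    intro j _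
    simp [Nat.add_comm, Nat.add_left_comm]

theorem foldl_append_map (l : List Int) (acc : List Int) :
    l.foldl (fun acc i => acc ++ [fibA i.toNat]) acc = acc ++ l.map (fun i => fibA i.toNat) := by
  induction l generalizing acc with
  | nil => simp
  | cons a t ih => simp [List.foldl, ih]

theorem printFib_eq (x : Int) (_hx : 0 ≤ x) : printFib x = printFib_alt x := by
  unfold printFib printFib_alt
  rw [foldl_append_map, PySem.List.pyRange_one]
  have h0 : fibLoop x.toNat (fibA 0) (fibA 1) = (List.range x.toNat).map (fun j => fibA (0 + j)) :=
    fibLoop_eq_map x.toNat 0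
  simp only [Nat.zero_add] at h0
  rw [show (fibLoop x.toNat 1 1) = fibLoop x.toNat (fibA 0) (fibA 1) from rfl, h0]
  simp [List.map_map, Function.comp]

-- ===== VERDICT (by name: the statement is the Claim_ definition above) =====
theorem printFib_spec : Claim_equal_printFib := by
  intro x _ hpre
  exact printFib_eq x hpre
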